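-- pv_equiv track=rewrite | github.com/Suah-Cho/Algorithm | Training/HandlingString/splitString/splitString.py | solution
-- ===== SOURCE A (Python) =====
-- def solution(s):
--     answer = 0
--     count1 = 0
--     count2 = 0
--
--     for i in s :
--         if count1 == count2 :
--             answer += 1
--             x = i
--         if x == i :
--             count1 += 1
--         else :
--             count2 += 1
--
--     return answer
-- ===== SOURCE B (Python) =====
-- def solution(s):
--     # Grouped consumption of a shared iterator: the outer for pulls the first
--     # character of each group (the pivot); the inner for consumes the rest of
--     # the group, tracking a signed balance (+1 pivot / -1 other) until it
--     # returns to zero. An exhausted iterator ends both loops.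
--     answer = 0
--     it = iter(s)
--     for pivot in it:
--         answer += 1
--         bal = 1
--         for c in it:
--             bal += 1 if c == pivot else -1
--             if bal == 0:
--                 break
--     return answer
-- ===== Notes on version B (the rewrite author's own statement) =====
-- stated objective: alternative
-- what changed: Replaces the flat indexed pass with two never-reset global counters and an implicit group-start flag by grouped consumption of a shared iterator: an outer loop pulls each group's pivot, an inner loop consumes that group with a local signed balance (+1 pivot / -1 other) until it hits zero.
import Mathlib
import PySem

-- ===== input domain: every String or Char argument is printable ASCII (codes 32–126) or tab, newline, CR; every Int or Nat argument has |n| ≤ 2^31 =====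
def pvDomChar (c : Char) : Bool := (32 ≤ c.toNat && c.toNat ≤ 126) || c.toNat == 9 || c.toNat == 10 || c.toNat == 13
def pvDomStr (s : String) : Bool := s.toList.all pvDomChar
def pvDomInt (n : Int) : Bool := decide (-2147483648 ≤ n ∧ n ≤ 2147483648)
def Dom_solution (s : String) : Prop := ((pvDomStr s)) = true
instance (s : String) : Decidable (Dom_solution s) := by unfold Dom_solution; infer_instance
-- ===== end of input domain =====

-- B replaces A's flat indexed pass with two never-reset counters by grouped
-- consumption of a shared iterator: an outer loop pulls each group's pivot, an
-- inner loop consumes the group with a local signed balance (alternative decomposition, same cost).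

-- ===== PORT A =====
-- one iteration of A's for-loop body over the state (answer, count1, count2, x);
-- Python's `x` is unassigned before the first iteration, where count1 == count2
-- always assigns it before use, so the initial ' ' is never read.
def solutionStepA (st : Int × Int × Int × Char) (i : Char) : Int × Int × Int × Char :=
  let answer := st.1
  let count1 := st.2.1
  let count2 := st.2.2.1
  let x := st.2.2.2
  let p := if count1 == count2 then (answer + 1, i) else (answer, x)
  let answer := p.1
  let x := p.2
  if x == i then (answer, count1 + 1, count2, x)
  else (answer, count1, count2 + 1, x)

def solution (s : String) : Int :=
  (s.toList.foldl solutionStepA (0, 0, 0, ' ')).1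

-- ===== PORT B =====
-- Source B's inner for-loop: consume the rest of the current group from the shared
-- iterator (the remaining list), tracking the signed balance until it hits 0;
-- returns what is left of the iterator ([] if it is exhausted, ending both loops).
def solutionInnerB (pivot : Char) (bal : Int) : List Char → List Char
  | [] => []
  | c :: rest =>
    let bal' := bal + (if c == pivot then 1 else -1)
    if bal' == 0 then rest else solutionInnerB pivot bal' rest

theorem solutionInnerB_length (pivot : Char) (bal : Int) (l : List Char) :
    (solutionInnerB pivot bal l).length ≤ l.length := by
  induction l generalizing bal with
  | nil => simp [solutionInnerB]
  | cons c rest ih =>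
    simp only [solutionInnerB]
    by_cases hb : (bal + (if c == pivot then 1 else -1) == 0) = true
    · rw [if_pos hb]; simp
    · rw [if_neg hb]; exact Nat.le_succ_of_le (ih _)

-- Source B's outer for-loop: pull each group's pivot from the shared iterator
def solutionGoB : List Char → Int
  | [] => 0
  | pivot :: rest => 1 + solutionGoB (solutionInnerB pivot 1 rest)
termination_by l => l.length
decreasing_by
  exact Nat.lt_succ_of_le (solutionInnerB_length _ _ _)

def solution_alt (s : String) : Int := solutionGoB s.toList

-- ===== PRECONDITION & SPEC =====
def Spec_solution (s : String) (out : Int) : Prop := out = solution_alt s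
instance (s : String) (out : Int) : Decidable (Spec_solution s out) := by unfold Spec_solution; infer_instance

-- ===== CLAIM (what is proved, stated in full; the proofs are below) =====
def Claim_equal_solution : Prop := ∀ (s : String), Dom_solution s → Spec_solution s (solution s)

-- ===== LEMMAS AND PROOFS =====

-- how the inner loop unfolds over one more character
theorem solutionInnerB_cons (pivot c : Char) (bal : Int) (rest : List Char) :
    solutionInnerB pivot bal (c :: rest)
      = if bal + (if c = pivot then 1 else -1) = 0 then rest
        else solutionInnerB pivot (bal + (if c = pivot then 1 else -1)) rest := by
  simp only [solutionInnerB]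
  by_cases hc : c = pivot
  · by_cases hz : bal + 1 = 0 <;> simp [hc, hz]
  · have hcx : (c == pivot) = false := by simpa using hc
    by_cases hz : bal + -1 = 0 <;> simp [hcx, hc, hz]

-- core invariant: A's fold from any state is the accumulator plus the groups B
-- still finds, where (c1 = c2) means "at a group boundary" and otherwise the
-- current (already-counted) group has pivot x and balance c1 - c2
theorem solution_fold_eq (l : List Char) :
    ∀ (a c1 c2 : Int) (x : Char),
      (List.foldl solutionStepA (a, c1, c2, x) l).1
        = a + (if c1 = c2 then solutionGoB l
               else solutionGoB (solutionInnerB x (c1 - c2) l)) := by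
  induction l with
  | nil =>
    intro a c1 c2 x
    by_cases h : c1 = c2 <;> simp [solutionGoB, solutionInnerB, h]
  | cons c rest ih =>
    intro a c1 c2 x
    by_cases h : c1 = c2
    · have hc : solutionStepA (a, c1, c2, x) c = (a + 1, c1 + 1, c2, c) := by
        simp [solutionStepA, h]
      have hne : ¬ (c1 + 1 = c2) := by omega
      rw [List.foldl_cons, hc, ih, if_neg hne, if_pos h]
      rw [show solutionGoB (c :: rest)
            = 1 + solutionGoB (solutionInnerB c 1 rest) from by rw [solutionGoB]]
      have : c1 + 1 - c2 = 1 := by omega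
      rw [this]; ring
    · rw [List.foldl_cons, if_neg h, solutionInnerB_cons]
      by_cases hx : x = c
      · subst hx
        have hc : solutionStepA (a, c1, c2, x) x = (a, c1 + 1, c2, x) := by
          simp [solutionStepA, h]
        rw [hc, ih]
        simp only [if_true]
        by_cases hz : c1 + 1 = c2
        · have h0 : c1 - c2 + 1 = 0 := by omega
          rw [if_pos hz, if_pos h0]
        · have h0 : ¬ (c1 - c2 + 1 = 0) := by omega
          have he : c1 - c2 + 1 = c1 + 1 - c2 := by ring
          rw [if_neg hz, if_neg h0, he]
      · have hc : solutionStepA (a, c1, c2, x) c = (a, c1, c2 + 1, x) := by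
          have hxc : (x == c) = false := by simpa using hx
          simp [solutionStepA, h, hxc]
        rw [hc, ih]
        have hcx : ¬ (c = x) := fun e => hx e.symm
        simp only [if_neg hcx]
        by_cases hz : c1 = c2 + 1
        · have h0 : c1 - c2 + -1 = 0 := by omega
          rw [if_pos hz, if_pos h0]
        · have h0 : ¬ (c1 - c2 + -1 = 0) := by omega
          have he : c1 - c2 + -1 = c1 - (c2 + 1) := by ring
          rw [if_neg hz, if_neg h0, he]

-- ===== VERDICT (by name: the statement is the Claim_ definition above) =====
theorem solution_spec : Claim_equal_solution := by
  intro s _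
  unfold Spec_solution solution solution_alt
  rw [solution_fold_eq, if_pos rfl]
  ring
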